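-- pv_equiv track=rewrite | github.com/lielserf/Search-in-Artificial-Intelligence---project | maze_main_man.py | h_lifo
-- ===== SOURCE A (Python) =====
-- def h_lifo(queue, num_sec_tie):
--     best_h = min(queue, key=lambda tup: tup[4])[4]
--     nodes_with_best_h = [val for val in queue if val[4] == best_h]
--     if len(nodes_with_best_h) > 1:
--         num_sec_tie += 1
--         node = max(nodes_with_best_h, key=lambda tup: tup[3])
--     else:
--         node = nodes_with_best_h[0]
--     return node, num_sec_tie
-- ===== SOURCE B (Python) =====
-- def h_lifo(queue, num_sec_tie):
--     if not queue:
--         raise ValueError("h_lifo: empty queue")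
--     best = None
--     count = 0
--     for tup in queue:
--         h = tup[4]
--         if best is None or h < best[4]:
--             best = tup
--             count = 1
--         elif h == best[4]:
--             count += 1
--             if tup[3] > best[3]:
--                 best = tup
--     if count > 1:
--         num_sec_tie += 1
--     return best, num_sec_tie
-- ===== Notes on version B (the rewrite author's own statement) =====
-- stated objective: alternative
-- what changed: Replaces A's three scans (min by h, filter by best h, max by tup[3]) with a single pass maintaining the current best node and a count of nodes tied on the best h.
import Mathlib
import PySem

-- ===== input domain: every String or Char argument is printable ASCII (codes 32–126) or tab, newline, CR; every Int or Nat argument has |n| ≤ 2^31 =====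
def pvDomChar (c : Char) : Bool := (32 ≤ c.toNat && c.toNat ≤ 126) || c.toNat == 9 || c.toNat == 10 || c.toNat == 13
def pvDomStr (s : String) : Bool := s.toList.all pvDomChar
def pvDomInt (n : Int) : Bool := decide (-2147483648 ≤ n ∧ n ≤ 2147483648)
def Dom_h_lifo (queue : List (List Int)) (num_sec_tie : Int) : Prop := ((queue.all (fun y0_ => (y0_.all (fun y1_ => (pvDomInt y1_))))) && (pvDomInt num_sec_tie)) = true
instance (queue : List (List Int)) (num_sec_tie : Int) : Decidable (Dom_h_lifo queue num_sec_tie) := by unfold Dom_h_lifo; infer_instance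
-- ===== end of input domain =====

-- B fuses A's three scans (min, filter, max) into one pass with a best node and a tie counter; same return value.

-- shared indexing helper: tup[i] (Pre_ guarantees the index is in range; 0 is never used inside Pre_)
def pvGet (tup : List Int) (i : Int) : Int := (PySem.List.pyGet? tup i).getD 0

-- ===== PORT A =====
def h_lifo (queue : List (List Int)) (num_sec_tie : Int) : List Int × Int :=
  let best_h := pvGet ((PySem.List.min? queue (fun tup => pvGet tup 4)).getD []) 4
  let nodes_with_best_h := queue.filter (fun val => pvGet val 4 == best_h)
  if nodes_with_best_h.length > 1 then
    ((PySem.List.max? nodes_with_best_h (fun tup => pvGet tup 3)).getD [], num_sec_tie + 1)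
  else
    ((PySem.List.pyGet? nodes_with_best_h 0).getD [], num_sec_tie)

-- ===== PORT B =====
-- loop body of Source B (state = (best, count)); the 'best is None' branch is the nonempty-match init below
def pvStep (st : List Int × Int) (tup : List Int) : List Int × Int :=
  if pvGet tup 4 < pvGet st.1 4 then (tup, 1)
  else if pvGet tup 4 == pvGet st.1 4 then
    ((if pvGet st.1 3 < pvGet tup 3 then tup else st.1), st.2 + 1)
  else st

def h_lifo_alt (queue : List (List Int)) (num_sec_tie : Int) : List Int × Int :=
  match queue with
  | [] => ([], num_sec_tie)   -- Source B raises ValueError here; outside Pre_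
  | t :: rest =>
    let st := rest.foldl pvStep (t, 1)
    (st.1, if st.2 > 1 then num_sec_tie + 1 else num_sec_tie)

-- ===== PRECONDITION & SPEC =====
-- Pre_ excludes exactly the inputs where Python A raises: min() of an empty queue (ValueError)
-- and tup[4] on an element shorter than 5 (IndexError).
def Pre_h_lifo (queue : List (List Int)) (num_sec_tie : Int) : Prop :=
  queue ≠ [] ∧ ∀ l ∈ queue, 5 ≤ l.length
instance (queue : List (List Int)) (num_sec_tie : Int) : Decidable (Pre_h_lifo queue num_sec_tie) := by unfold Pre_h_lifo; infer_instance

def pvWitness_h_lifo : List (List Int) × Int := ([[0, 1, 2, 0, 1], [3, 4, 5, 2, 1]], 0)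

def Spec_h_lifo (queue : List (List Int)) (num_sec_tie : Int) (out : List Int × Int) : Prop := out = h_lifo_alt queue num_sec_tie
instance (queue : List (List Int)) (num_sec_tie : Int) (out : List Int × Int) : Decidable (Spec_h_lifo queue num_sec_tie out) := by unfold Spec_h_lifo; infer_instance

-- ===== CLAIM (what is proved, stated in full; the proofs are below) =====
def Claim_equal_h_lifo : Prop := ∀ (queue : List (List Int)) (num_sec_tie : Int), Dom_h_lifo queue num_sec_tie → Pre_h_lifo queue num_sec_tie → Spec_h_lifo queue num_sec_tie (h_lifo queue num_sec_tie)

-- ===== LEMMAS AND PROOFS =====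

-- invariant of B's fold over the processed prefix p:
-- the kept node minimises tup[4] over p, it is Python's max (first maximal by tup[3])
-- of the tied nodes of p, and the counter counts the tied nodes of p.
def pvInv (p : List (List Int)) (b : List Int) (c : Int) : Prop :=
  (∀ y ∈ p, pvGet b 4 ≤ pvGet y 4) ∧
  PySem.List.max? (p.filter (fun y => pvGet y 4 == pvGet b 4)) (fun y => pvGet y 3) = some b ∧
  c = (p.countP (fun y => pvGet y 4 == pvGet b 4) : Int)

theorem pv_max?_append_single {α κ : Type} [LT κ] [DecidableLT κ] (l : List α) (x : α) (key : α → κ) :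
    PySem.List.max? (l ++ [x]) key =
      match PySem.List.max? l key with
      | none => some x
      | some m => if key m < key x then some x else some m := by
  simp only [PySem.List.max?, List.foldl_append, List.foldl_cons, List.foldl_nil]
  rfl

theorem pvInv_init (t : List Int) : pvInv [t] t 1 := by
  refine ⟨by simp, ?_, by simp⟩
  simp [PySem.List.max?]

theorem pvInv_step (p : List (List Int)) (b : List Int) (c : Int) (x : List Int)
    (h : pvInv p b c) : pvInv (p ++ [x]) (pvStep (b, c) x).1 (pvStep (b, c) x).2 := by
  obtain ⟨hmin, hmax, hcnt⟩ := h
  unfold pvStep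
  by_cases hlt : pvGet x 4 < pvGet b 4
  · -- strictly smaller h: reset
    simp only [hlt, if_true]
    refine ⟨?_, ?_, ?_⟩
    · intro y hy
      rcases List.mem_append.mp hy with hy | hy
      · exact le_of_lt (lt_of_lt_of_le hlt (hmin y hy))
      · simp at hy; simp [hy]
    · have hfp : p.filter (fun y => pvGet y 4 == pvGet x 4) = [] := by
        apply List.filter_eq_nil_iff.mpr
        intro y hy
        have : pvGet x 4 < pvGet y 4 := lt_of_lt_of_le hlt (hmin y hy)
        simp; omega
      simp [List.filter_append, hfp, PySem.List.max?]
    · have hfp : p.countP (fun y => pvGet y 4 == pvGet x 4) = 0 := by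
        apply List.countP_eq_zero.mpr
        intro y hy
        have : pvGet x 4 < pvGet y 4 := lt_of_lt_of_le hlt (hmin y hy)
        simp; omega
      simp [List.countP_append, hfp]
  · by_cases heq : pvGet x 4 = pvGet b 4
    · -- tied on h: bump counter, keep first maximal by tup[3]
      rw [if_neg hlt, if_pos (show (pvGet x 4 == pvGet b 4) = true by simp [heq])]
      have hb4 : pvGet (if pvGet b 3 < pvGet x 3 then x else b) 4 = pvGet b 4 := by
        split <;> simp [heq]
      refine ⟨?_, ?_, ?_⟩
      · intro y hy
        rcases List.mem_append.mp hy with hy | hy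
        · rw [hb4]; exact hmin y hy
        · simp at hy; rw [hb4, hy, heq]
      · rw [hb4, List.filter_append]
        have hx : (List.filter (fun y => pvGet y 4 == pvGet b 4) [x]) = [x] := by
          simp [heq]
        rw [hx, pv_max?_append_single, hmax]
        by_cases h3 : pvGet b 3 < pvGet x 3 <;> simp [h3]
      · rw [hb4, List.countP_append, hcnt]
        have : List.countP (fun y => pvGet y 4 == pvGet b 4) [x] = 1 := by simp [heq]
        rw [this]; push_cast; ring
    · -- strictly larger h: state unchanged
      have hne : (pvGet x 4 == pvGet b 4) = false := by simp [heq]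
      simp only [hlt, if_false, hne, Bool.false_eq_true]
      refine ⟨?_, ?_, ?_⟩
      · intro y hy
        rcases List.mem_append.mp hy with hy | hy
        · exact hmin y hy
        · simp at hy; subst hy; omega
      · rw [List.filter_append]; simpa [hne] using hmax
      · rw [List.countP_append]; simpa [hne] using hcnt

theorem pvInv_fold (rest : List (List Int)) :
    ∀ (p : List (List Int)) (b : List Int) (c : Int), pvInv p b c →
      pvInv (p ++ rest) (rest.foldl pvStep (b, c)).1 (rest.foldl pvStep (b, c)).2 := by
  induction rest with
  | nil => intro p b c h; simpa using h
  | cons x r ih =>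
    intro p b c h
    have hstep := pvInv_step p b c x h
    have := ih (p ++ [x]) (pvStep (b, c) x).1 (pvStep (b, c) x).2 hstep
    simpa [List.append_assoc, List.foldl_cons] using this

theorem h_lifo_alt_cons (t : List Int) (rest : List (List Int)) (n : Int) :
    h_lifo_alt (t :: rest) n =
      ((rest.foldl pvStep (t, 1)).1, if (rest.foldl pvStep (t, 1)).2 > 1 then n + 1 else n) := rfl

theorem h_lifo_spec : Claim_equal_h_lifo := by
  intro queue n _dom hpre
  unfold Spec_h_lifo
  obtain ⟨hne, _hlen⟩ := hpre
  match queue with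
  | [] => exact absurd rfl hne
  | t :: rest =>
    have hinv := pvInv_fold rest [t] t 1 (pvInv_init t)
    rw [List.singleton_append] at hinv
    set b := (rest.foldl pvStep (t, 1)).1 with hbdef
    set c := (rest.foldl pvStep (t, 1)).2 with hcdef
    obtain ⟨hmin, hmax, hcnt⟩ := hinv
    -- A side
    obtain ⟨m, hm⟩ : ∃ m, PySem.List.min? (t :: rest) (fun tup => pvGet tup 4) = some m := by
      rcases h : PySem.List.min? (t :: rest) (fun tup => pvGet tup 4) with _ | m
      · exact absurd ((PySem.List.min?_eq_none_iff _ _).mp h) (by simp)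
      · exact ⟨m, rfl⟩
    have hbmem : b ∈ t :: rest := List.mem_of_mem_filter (PySem.List.max?_mem hmax)
    have hbh : pvGet m 4 = pvGet b 4 :=
      le_antisymm (PySem.List.min?_isMin hm b hbmem) (hmin m (PySem.List.min?_mem hm))
    have hbnodes : b ∈ (t :: rest).filter (fun y => pvGet y 4 == pvGet b 4) :=
      List.mem_filter.mpr ⟨hbmem, by simp⟩
    unfold h_lifo
    rw [hm]
    simp only [Option.getD_some, hbh]
    set nodes := (t :: rest).filter (fun y => pvGet y 4 == pvGet b 4) with hnodes
    have hcntlen : c = (nodes.length : Int) := by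
      rw [hcnt, hnodes, List.countP_eq_length_filter]
    by_cases hlen : nodes.length > 1
    · have hc1 : c > 1 := by rw [hcntlen]; exact_mod_cast hlen
      simp only [hlen, if_true]
      rw [h_lifo_alt_cons, ← hbdef, ← hcdef]
      simp [hmax, hc1]
    · have hlen1 : nodes.length = 1 := by
        have : 0 < nodes.length := List.length_pos_of_mem hbnodes
        omega
      obtain ⟨z, hz⟩ := List.length_eq_one_iff.mp hlen1
      have hzb : z = b := by
        have hm2 := hmax
        rw [hz] at hm2
        simpa [PySem.List.max?] using hm2
      have hc1 : ¬ c > 1 := by rw [hcntlen, hlen1]; omega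
      simp only [hlen, if_false]
      rw [h_lifo_alt_cons, ← hbdef, ← hcdef]
      simp [hz, hzb, hc1, PySem.List.pyGet?, PySem.List.pyIdx?]
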